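-- pv_equiv track=rewrite | github.com/MrHamdulay/csc3-capstone | examples/data/Assignment_8/hndjar002/question4.py | palindrome_prime
-- ===== SOURCE A (Python) =====
-- def palindrome_prime(n, m, p):
--     if n > m:
--         return p
--     else:
--         if n <= m:
--             p.append(n)
--             #return palindrome_prime(n+1,m,p)
--
--         P = n//10
--
--         #if p[0] > 1:
--         #if mod == 0 or P == 0
--         return palindrome_prime(n+1,m,p)
-- ===== SOURCE B (Python) =====
-- def palindrome_prime(n, m, p):
--     for i in range(n, m + 1):
--         p.append(i)
--     return p
-- ===== Notes on version B (the rewrite author's own statement) =====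
-- stated objective: simpler
-- what changed: Replaced the self-recursive append (with a dead n//10 computation) by a plain iterative for-loop over range(n, m+1); Pre_ excludes ranges with m-n >= 998, where A raises RecursionError.
import Mathlib
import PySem

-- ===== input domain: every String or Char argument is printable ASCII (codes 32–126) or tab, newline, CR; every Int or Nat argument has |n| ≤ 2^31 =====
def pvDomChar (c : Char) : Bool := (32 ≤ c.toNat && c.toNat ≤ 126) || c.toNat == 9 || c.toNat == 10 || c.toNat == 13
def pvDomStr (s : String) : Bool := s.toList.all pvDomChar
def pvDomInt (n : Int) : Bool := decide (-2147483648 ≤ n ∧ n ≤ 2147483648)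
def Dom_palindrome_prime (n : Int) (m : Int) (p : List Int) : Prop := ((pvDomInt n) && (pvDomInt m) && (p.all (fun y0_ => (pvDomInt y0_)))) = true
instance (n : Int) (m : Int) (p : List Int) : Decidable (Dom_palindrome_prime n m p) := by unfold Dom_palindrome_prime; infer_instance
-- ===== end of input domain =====

-- ===== PORT A =====
-- One honest line: B replaces A's recursion (with its unused P = n//10) by an iterative range loop; A mutates p in place, equivalence is about the return value.
def palindrome_prime (n : Int) (m : Int) (p : List Int) : List Int :=
  if n > m then p
  else
    let p := if n ≤ m then p ++ [n] else p
    let _P := PySem.Int.floordiv n 10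
    palindrome_prime (n + 1) m p
termination_by (m + 1 - n).toNat
decreasing_by omega

-- ===== PORT B =====
def palindrome_prime_alt (n : Int) (m : Int) (p : List Int) : List Int :=
  (PySem.List.pyRange n (m + 1) 1).foldl (fun acc i => acc ++ [i]) p

-- ===== PRECONDITION & SPEC =====
-- Pre_ excludes long ranges (m - n ≥ 998), on which A's unbounded recursion raises RecursionError
-- at CPython's default recursion limit.
def Pre_palindrome_prime (n : Int) (m : Int) (p : List Int) : Prop := m - n < 998
instance (n : Int) (m : Int) (p : List Int) : Decidable (Pre_palindrome_prime n m p) := by unfold Pre_palindrome_prime; infer_instance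
def pvWitness_palindrome_prime : Int × Int × List Int := (2, 7, [1, 4])

def Spec_palindrome_prime (n : Int) (m : Int) (p : List Int) (out : List Int) : Prop := out = palindrome_prime_alt n m p
instance (n : Int) (m : Int) (p : List Int) (out : List Int) : Decidable (Spec_palindrome_prime n m p out) := by unfold Spec_palindrome_prime; infer_instance

-- ===== CLAIM (what is proved, stated in full; the proofs are below) =====
def Claim_equal_palindrome_prime : Prop := ∀ (n : Int) (m : Int) (p : List Int), Dom_palindrome_prime n m p → Pre_palindrome_prime n m p → Spec_palindrome_prime n m p (palindrome_prime n m p)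

-- ===== LEMMAS AND PROOFS =====

-- ===== VERDICT (by name: the statement is the Claim_ definition above) =====
-- A appends n..m one by one: it equals p ++ pyRange n (m+1) 1.
theorem palindrome_prime_eq_append (n m : Int) (p : List Int) :
    palindrome_prime n m p = p ++ PySem.List.pyRange n (m + 1) 1 := by
  by_cases h : n > m
  · rw [palindrome_prime, if_pos h, PySem.List.pyRange_one_eq_nil (by omega), List.append_nil]
  · rw [palindrome_prime, if_neg h, if_pos (by omega),
      palindrome_prime_eq_append (n + 1) m (p ++ [n]), List.append_assoc,
      PySem.List.pyRange_one_cons (show n < m + 1 by omega)]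
    rfl
termination_by (m + 1 - n).toNat
decreasing_by omega

theorem palindrome_prime_spec : Claim_equal_palindrome_prime := by
  intro n m p _ _
  unfold Spec_palindrome_prime palindrome_prime_alt
  rw [palindrome_prime_eq_append, PySem.List.foldl_append_singleton_eq_self]
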